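-- pv_equiv track=rewrite | github.com/ronyut/bisli | pyan-master/Transcript.py | isEdgeLettersSame
-- ===== SOURCE A (Python) =====
-- def isEdgeLettersSame(s1, s2, exceptions):
--     startOk = False
--     endOk = False
--
--     # if the first letter of each word aren't the same - don't merge
--     if s1[0] != s2[0]:
--         for c in exceptions:
--             if (s1[0] == c and s2[0] in exceptions) or (s2[0] == c and s1[0] in exceptions):
--                 startOk = True
--                 break
--     else:
--         startOk = True
--
--     # if the last letter of each word aren't the same - don't merge
--     if s1[-1] != s2[-1]:
--         for c in exceptions:
--             if (s1[-1] == c and s2[-1] in exceptions) or (s2[-1] == c and s1[-1] in exceptions):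
--                 endOk = True
--                 break
--     else:
--         endOk = True
--
--     # return true only if start and end are okay
--     if (s1[0] == s2[0] and s1[-1] == s2[-1]) or (startOk and endOk):
--         return True
--     else:
--         return False
-- ===== SOURCE B (Python) =====
-- def isEdgeLettersSame(s1, s2, exceptions):
--     # One fused pass over `exceptions` accumulating membership flags for all
--     # four edge letters at once, instead of A's per-edge scans with nested
--     # membership tests inside the loop body.
--     a1, a2, b1, b2 = s1[0], s2[0], s1[-1], s2[-1]
--     m1 = m2 = m3 = m4 = False
--     for c in exceptions:
--         m1 = m1 or c == a1
--         m2 = m2 or c == a2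
--         m3 = m3 or c == b1
--         m4 = m4 or c == b2
--     return (a1 == a2 or (m1 and m2)) and (b1 == b2 or (m3 and m4))
-- ===== Notes on version B (the rewrite author's own statement) =====
-- stated objective: alternative
-- what changed: Replaces A's two duplicated break-scans (each with nested membership tests per iteration, O(n^2)) and the redundant final equality disjunct by ONE fused pass over exceptions that accumulates four membership flags, combined at the end into the two edge conditions.
import Mathlib
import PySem

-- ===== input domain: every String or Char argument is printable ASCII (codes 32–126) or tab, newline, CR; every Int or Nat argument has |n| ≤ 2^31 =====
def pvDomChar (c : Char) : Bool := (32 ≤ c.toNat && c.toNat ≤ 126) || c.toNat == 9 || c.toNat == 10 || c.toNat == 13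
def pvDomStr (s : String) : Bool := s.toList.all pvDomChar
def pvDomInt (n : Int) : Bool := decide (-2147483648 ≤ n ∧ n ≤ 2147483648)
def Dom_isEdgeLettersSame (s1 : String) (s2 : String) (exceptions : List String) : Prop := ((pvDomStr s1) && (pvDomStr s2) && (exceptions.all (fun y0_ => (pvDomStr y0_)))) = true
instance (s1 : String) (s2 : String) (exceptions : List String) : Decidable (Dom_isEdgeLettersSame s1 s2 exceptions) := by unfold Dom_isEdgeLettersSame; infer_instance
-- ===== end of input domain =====

-- B replaces A's two duplicated break-scans (with nested membership tests) by one fused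
-- pass over `exceptions` accumulating four membership flags; objective: alternative.

-- ===== PORT A =====
-- Python's membership test `x in exceptions` for the one-char string of edge letter a
def pvMemA (exceptions : List String) (a : Char) : Bool :=
  exceptions.any (fun e => e.toList == [a])

-- the `for c in exceptions: … break` loop of A, scanning `rest`
def pvScanA (exceptions : List String) (x y : Char) : List String → Bool
  | [] => false
  | c :: cs =>
      if (c.toList == [x] && pvMemA exceptions y) || (c.toList == [y] && pvMemA exceptions x) then
        true
      else pvScanA exceptions x y cs

def isEdgeLettersSame (s1 : String) (s2 : String) (exceptions : List String) : Bool :=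
  -- s1[0], s2[0], s1[-1], s2[-1]; total via pyGetD, in range under Pre_
  let a1 := PySem.List.pyGetD s1.toList 0 ' '
  let a2 := PySem.List.pyGetD s2.toList 0 ' '
  let b1 := PySem.List.pyGetD s1.toList (-1) ' '
  let b2 := PySem.List.pyGetD s2.toList (-1) ' '
  let startOk := if a1 ≠ a2 then pvScanA exceptions a1 a2 exceptions else true
  let endOk := if b1 ≠ b2 then pvScanA exceptions b1 b2 exceptions else true
  if (a1 == a2 && b1 == b2) || (startOk && endOk) then true else false

-- ===== PORT B =====
-- the fused pass: fold over exceptions accumulating the four membership flags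
def isEdgeLettersSame_alt (s1 : String) (s2 : String) (exceptions : List String) : Bool :=
  let a1 := PySem.List.pyGetD s1.toList 0 ' '
  let a2 := PySem.List.pyGetD s2.toList 0 ' '
  let b1 := PySem.List.pyGetD s1.toList (-1) ' '
  let b2 := PySem.List.pyGetD s2.toList (-1) ' '
  let m := exceptions.foldl
    (fun (m : Bool × Bool × Bool × Bool) c =>
      (m.1 || c.toList == [a1], m.2.1 || c.toList == [a2],
       m.2.2.1 || c.toList == [b1], m.2.2.2 || c.toList == [b2]))
    (false, false, false, false)
  (a1 == a2 || (m.1 && m.2.1)) && (b1 == b2 || (m.2.2.1 && m.2.2.2))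

-- ===== PRECONDITION & SPEC =====
-- Python A raises IndexError when s1 or s2 is empty (s[0]); exactly those inputs are excluded.
def Pre_isEdgeLettersSame (s1 : String) (s2 : String) (exceptions : List String) : Prop :=
  s1 ≠ "" ∧ s2 ≠ ""
instance (s1 : String) (s2 : String) (exceptions : List String) : Decidable (Pre_isEdgeLettersSame s1 s2 exceptions) := by unfold Pre_isEdgeLettersSame; infer_instance

def pvWitness_isEdgeLettersSame : String × String × List String := ("ab", "xb", ["a", "x"])

def Spec_isEdgeLettersSame (s1 : String) (s2 : String) (exceptions : List String) (out : Bool) : Prop := out = isEdgeLettersSame_alt s1 s2 exceptions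
instance (s1 : String) (s2 : String) (exceptions : List String) (out : Bool) : Decidable (Spec_isEdgeLettersSame s1 s2 exceptions out) := by unfold Spec_isEdgeLettersSame; infer_instance

-- ===== CLAIM =====
def Claim_equal_isEdgeLettersSame : Prop := ∀ (s1 : String) (s2 : String) (exceptions : List String), Dom_isEdgeLettersSame s1 s2 exceptions → Pre_isEdgeLettersSame s1 s2 exceptions → Spec_isEdgeLettersSame s1 s2 exceptions (isEdgeLettersSame s1 s2 exceptions)

-- ===== LEMMAS AND PROOFS =====

-- A's scan over `rest` is the list `any` of its break condition
theorem pvScanA_eq_any (exceptions : List String) (x y : Char) :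
    ∀ rest : List String,
      pvScanA exceptions x y rest =
        rest.any (fun c => (c.toList == [x] && pvMemA exceptions y) || (c.toList == [y] && pvMemA exceptions x)) := by
  intro rest
  induction rest with
  | nil => rfl
  | cons c cs ih =>
      simp only [pvScanA, List.any_cons]
      split_ifs with h
      · simp [h]
      · rw [Bool.eq_false_iff.mpr h, Bool.false_or, ih]

-- scanning the whole exception list finds a match exactly when both letters are in it
theorem pvScanA_full (exceptions : List String) (x y : Char) :
    pvScanA exceptions x y exceptions = (pvMemA exceptions x && pvMemA exceptions y) := by
  rw [pvScanA_eq_any]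
  cases hx : pvMemA exceptions x <;> cases hy : pvMemA exceptions y <;>
    simp only [hx, hy, Bool.and_false, Bool.and_true, Bool.or_false, Bool.false_or,
      Bool.or_self, Bool.and_self]
  · simp
  · exact hx
  · exact hy
  · have hx' : (exceptions.any fun e => e.toList == [x]) = true := hx
    rcases List.any_eq_true.mp hx' with ⟨e, he, hex⟩
    exact List.any_eq_true.mpr ⟨e, he, by simp only [beq_iff_eq] at hex ⊢; simp [hex]⟩

-- B's fused fold computes the four membership flags componentwise
theorem flags_eq (f1 f2 f3 f4 : String → Bool) :
    ∀ (l : List String) (m1 m2 m3 m4 : Bool),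
      l.foldl (fun (m : Bool × Bool × Bool × Bool) c =>
        (m.1 || f1 c, m.2.1 || f2 c, m.2.2.1 || f3 c, m.2.2.2 || f4 c)) (m1, m2, m3, m4)
        = (m1 || l.any f1, m2 || l.any f2, m3 || l.any f3, m4 || l.any f4) := by
  intro l
  induction l with
  | nil => intro m1 m2 m3 m4; simp
  | cons c cs ih =>
      intro m1 m2 m3 m4
      simp only [List.foldl_cons, List.any_cons, ih, Bool.or_assoc]

-- ===== VERDICT =====
theorem isEdgeLettersSame_spec : Claim_equal_isEdgeLettersSame := by
  intro s1 s2 exceptions _ _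
  unfold Spec_isEdgeLettersSame isEdgeLettersSame isEdgeLettersSame_alt
  set a1 := PySem.List.pyGetD s1.toList 0 ' '
  set a2 := PySem.List.pyGetD s2.toList 0 ' '
  set b1 := PySem.List.pyGetD s1.toList (-1) ' '
  set b2 := PySem.List.pyGetD s2.toList (-1) ' '
  simp only [pvScanA_full, flags_eq, Bool.false_or]
  show _ = ((a1 == a2 || (pvMemA exceptions a1 && pvMemA exceptions a2)) &&
            (b1 == b2 || (pvMemA exceptions b1 && pvMemA exceptions b2)))
  by_cases h1 : a1 = a2 <;> by_cases h2 : b1 = b2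
  · simp [h1, h2]
  · simp [h1, h2, beq_eq_false_iff_ne.mpr h2]
  · simp [h1, h2, beq_eq_false_iff_ne.mpr h1]
  · simp [h1, h2, beq_eq_false_iff_ne.mpr h1, beq_eq_false_iff_ne.mpr h2, Bool.and_assoc]
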